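-- pv_equiv track=rewrite | github.com/kgruel/siftd | src/adapters/aider.py | _split_into_sessions
-- ===== SOURCE A (Python) =====
-- _SESSION_START_EVENTS = {"cli session", "gui session", "launched"}
--
-- def _split_into_sessions(records: list[dict]) -> list[list[dict]]:
--     """Split analytics records into session groups.
--
--     A new session starts when a session-start event is encountered.
--     Records before the first session-start are grouped as a standalone session.
--     """
--     sessions: list[list[dict]] = []
--     current: list[dict] = []
--
--     for record in records:
--         event = record.get("event", "")
--         if event in _SESSION_START_EVENTS and current:
--             sessions.append(current)
--             current = []
--         current.append(record)
--
--     if current: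
--         sessions.append(current)
--
--     return sessions
-- ===== SOURCE B (Python) =====
-- _SESSION_START_EVENTS = {"cli session", "gui session", "launched"}
--
--
-- def _split_into_sessions(records):
--     """Index-then-slice: collect interior session-start boundaries, then cut."""
--     if not records:
--         return []
--     bounds = [i for i, r in enumerate(records)
--               if i > 0 and r.get("event", "") in _SESSION_START_EVENTS]
--     edges = [0] + bounds + [len(records)]
--     return [records[s:e] for s, e in zip(edges, edges[1:])]
-- ===== Notes on version B (the rewrite author's own statement) =====
-- stated objective: alternative
-- what changed: Replaces the streaming accumulate-and-flush loop with a two-phase pass: first collect the interior boundary indices (enumerate + membership test), then cut the record list into slices between consecutive boundaries.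
import Mathlib
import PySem

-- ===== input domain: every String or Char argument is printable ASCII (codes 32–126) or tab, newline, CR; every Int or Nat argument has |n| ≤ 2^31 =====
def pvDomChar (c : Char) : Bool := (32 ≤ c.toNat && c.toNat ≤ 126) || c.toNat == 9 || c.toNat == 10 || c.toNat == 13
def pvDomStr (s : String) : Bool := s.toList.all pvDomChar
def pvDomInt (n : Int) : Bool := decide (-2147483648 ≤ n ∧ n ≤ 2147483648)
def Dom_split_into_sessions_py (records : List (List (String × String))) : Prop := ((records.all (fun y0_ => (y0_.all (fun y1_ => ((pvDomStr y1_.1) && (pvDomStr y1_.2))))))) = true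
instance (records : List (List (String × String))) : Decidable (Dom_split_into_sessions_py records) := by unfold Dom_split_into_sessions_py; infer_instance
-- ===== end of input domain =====

-- B replaces A's single accumulate-and-flush loop by an index-then-slice two-phase pass (alternative decomposition, same cost).

-- ===== PORT A =====
-- module constant _SESSION_START_EVENTS (a set literal)
def pvSessionStartEvents : PySem.Set String :=
  PySem.Set.ofList ["cli session", "gui session", "launched"]

-- record.get("event", "") in _SESSION_START_EVENTS  (shared by both Pythons via the module constant)
def pvIsStart (record : List (String × String)) : Bool :=
  pvSessionStartEvents.contains ((PySem.Dict.mk record).getD "event" "")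

def split_into_sessions_py (records : List (List (String × String))) : List (List (List (String × String))) :=
  let res := records.foldl
    (fun (st : List (List (List (String × String))) × List (List (String × String))) record =>
      let st := if pvIsStart record && !st.2.isEmpty then (st.1 ++ [st.2], []) else st
      (st.1, st.2 ++ [record]))
    ([], [])
  if !res.2.isEmpty then res.1 ++ [res.2] else res.1

-- ===== PORT B =====
def split_into_sessions_py_alt (records : List (List (String × String))) : List (List (List (String × String))) :=
  if records.isEmpty then []
  else
    let bounds := (PySem.List.enumerate records).filterMap
      (fun p => if p.1 > 0 && pvIsStart p.2 then some p.1 else none)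
    let edges := (0 : Int) :: (bounds ++ [(records.length : Int)])
    (edges.zip edges.tail).map (fun p => PySem.List.slice records (some p.1) (some p.2))

-- ===== PRECONDITION & SPEC =====
def Spec_split_into_sessions_py (records : List (List (String × String))) (out : List (List (List (String × String)))) : Prop := out = split_into_sessions_py_alt records
instance (records : List (List (String × String))) (out : List (List (List (String × String)))) : Decidable (Spec_split_into_sessions_py records out) := by unfold Spec_split_into_sessions_py; infer_instance

-- ===== CLAIM (what is proved, stated in full; the proofs are below) =====
def Claim_equal_split_into_sessions_py : Prop := ∀ (records : List (List (String × String))), Dom_split_into_sessions_py records → Spec_split_into_sessions_py records (split_into_sessions_py records)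

-- ===== LEMMAS AND PROOFS =====

-- Common reference: the session decomposition, recursively by span.
def pvChunks : List (List (String × String)) → List (List (List (String × String)))
  | [] => []
  | r :: rest =>
      (r :: rest.takeWhile (fun x => !pvIsStart x)) :: pvChunks (rest.dropWhile (fun x => !pvIsStart x))
termination_by xs => xs.length
decreasing_by
  simpa using Nat.lt_succ_of_le (List.length_dropWhile_le _ _)

theorem pvChunks_nil : pvChunks [] = [] := by rw [pvChunks.eq_def]

theorem pvChunks_cons (r : List (String × String)) (rest : List (List (String × String))) :
    pvChunks (r :: rest) =
      (r :: rest.takeWhile (fun x => !pvIsStart x)) :: pvChunks (rest.dropWhile (fun x => !pvIsStart x)) := by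
  rw [pvChunks.eq_def]

-- A's loop body and final flush, named for the proofs (definitionally A's fold).
def pvStepA (st : List (List (List (String × String))) × List (List (String × String)))
    (record : List (String × String)) :
    List (List (List (String × String))) × List (List (String × String)) :=
  let st := if pvIsStart record && !st.2.isEmpty then (st.1 ++ [st.2], []) else st
  (st.1, st.2 ++ [record])

def pvFinishA (st : List (List (List (String × String))) × List (List (String × String))) :
    List (List (List (String × String))) :=
  if !st.2.isEmpty then st.1 ++ [st.2] else st.1

theorem pvA_loop (xs : List (List (String × String))) :
    ∀ (sessions : List (List (List (String × String)))) (current : List (List (String × String))),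
      current ≠ [] →
      pvFinishA (xs.foldl pvStepA (sessions, current)) =
        sessions ++ ((current ++ xs.takeWhile (fun x => !pvIsStart x)) ::
          pvChunks (xs.dropWhile (fun x => !pvIsStart x))) := by
  induction xs with
  | nil =>
      intro sessions current hc
      simp [pvFinishA, pvChunks_nil, hc]
  | cons x rest ih =>
      intro sessions current hc
      by_cases hx : pvIsStart x = true
      · have hstep : pvStepA (sessions, current) x = (sessions ++ [current], [x]) := by
          simp [pvStepA, hx, hc]
        rw [List.foldl_cons, hstep, ih (sessions ++ [current]) [x] (by simp)]
        rw [List.takeWhile_cons, List.dropWhile_cons]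
        simp [hx, pvChunks_cons]
      · have hx' : pvIsStart x = false := by simpa using hx
        have hstep : pvStepA (sessions, current) x = (sessions, current ++ [x]) := by
          simp [pvStepA, hx']
        rw [List.foldl_cons, hstep, ih sessions (current ++ [x]) (by simp)]
        rw [List.takeWhile_cons, List.dropWhile_cons]
        simp [hx']

theorem pvA_eq_chunks (records : List (List (String × String))) :
    split_into_sessions_py records = pvChunks records := by
  cases records with
  | nil => simp [split_into_sessions_py, pvChunks_nil]
  | cons r rest =>
      have h0 : pvStepA ([], []) r = ([], [r]) := by simp [pvStepA]
      have h1 : split_into_sessions_py (r :: rest) =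
          pvFinishA ((r :: rest).foldl pvStepA ([], [])) := rfl
      rw [h1, List.foldl_cons, h0, pvA_loop rest [] [r] (by simp), pvChunks_cons]
      simp

-- B side: Nat-valued boundary indices, recursively.
def pvStarts : List (List (String × String)) → List Nat
  | [] => []
  | y :: ys => if pvIsStart y then 0 :: (pvStarts ys).map (· + 1) else (pvStarts ys).map (· + 1)

theorem pvBounds_eq (ys : List (List (String × String))) :
    ∀ (s : Nat), 1 ≤ s →
      (PySem.List.enumerate ys (s : Int)).filterMap
          (fun p => if p.1 > 0 && pvIsStart p.2 then some p.1 else none) =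
        (pvStarts ys).map (fun k => ((k + s : Nat) : Int)) := by
  induction ys with
  | nil => intro s hs; simp [PySem.List.enumerate_nil, pvStarts]
  | cons y ys ih =>
      intro s hs
      have hcast : ((s : Int) + 1) = ((s + 1 : Nat) : Int) := by push_cast; ring
      rw [PySem.List.enumerate_cons, List.filterMap_cons, hcast, ih (s + 1) (by omega)]
      have hspos : decide ((s : Int) > 0) = true := by simp; omega
      cases hy : pvIsStart y
      · simp only [hy, Bool.and_false, pvStarts, Bool.false_eq_true, if_false, List.map_map]
        apply List.map_congr_left
        intro a _; simp; omega
      · simp only [hy, Bool.and_true, hspos, pvStarts, if_true, List.map_cons, List.map_map]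
        congr 1
        · simp
        · apply List.map_congr_left
          intro a _; simp; omega

-- slices between consecutive Nat edges
def pvSlices (xs : List (List (String × String))) : List Nat → List (List (List (String × String)))
  | [] => []
  | [_] => []
  | a :: b :: rest => ((xs.drop a).take (b - a)) :: pvSlices xs (b :: rest)

theorem pvZipMap_eq_slices (xs : List (List (String × String))) :
    ∀ (es : List Nat),
      (((es.map (Nat.cast : Nat → Int)).zip (es.map (Nat.cast : Nat → Int)).tail).map
          (fun p => PySem.List.slice xs (some p.1) (some p.2))) = pvSlices xs es := by
  intro es
  induction es with
  | nil => rfl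
  | cons a es ih =>
      cases es with
      | nil => rfl
      | cons b rest =>
          simp only [List.map_cons, List.tail_cons, List.zip_cons_cons, List.map_cons] at ih ⊢
          rw [PySem.List.slice_natCast]
          exact congrArg _ ih

theorem pvStarts_no_start_append (t : List (List (String × String)))
    (ys : List (List (String × String))) (ht : ∀ x ∈ t, pvIsStart x = false) :
    pvStarts (t ++ ys) = (pvStarts ys).map (· + t.length) := by
  induction t with
  | nil => simp
  | cons x t ih =>
      have hx := ht x (by simp)
      rw [List.cons_append, pvStarts]
      simp only [hx, Bool.false_eq_true, if_false]
      rw [ih (fun y hy => ht y (by simp [hy])), List.map_map]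
      apply List.map_congr_left
      intro k _; simp; omega

theorem pvSlices_chunks (n : Nat) :
    ∀ (rest : List (List (String × String))), rest.length ≤ n →
    ∀ (u : List (List (String × String))) (r : List (String × String)),
      pvSlices (u ++ r :: rest)
          (u.length :: ((pvStarts rest).map (· + (u.length + 1)) ++ [u.length + 1 + rest.length])) =
        pvChunks (r :: rest) := by
  induction n with
  | zero =>
      intro rest hlen u r
      have h0 : rest = [] := List.length_eq_zero_iff.mp (Nat.le_zero.mp hlen)
      subst h0
      rw [pvChunks_cons]
      simp only [pvStarts, List.map_nil, List.nil_append, List.takeWhile_nil,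
        List.dropWhile_nil, pvChunks_nil, pvSlices]
      rw [List.drop_left' (l₁ := u) rfl]
      have h1 : u.length + 1 + ([] : List (List (String × String))).length - u.length = 1 := by
        simp
      rw [h1]
      rfl
  | succ n ih =>
      intro rest hlen u r
      have hsplit : rest = rest.takeWhile (fun x => !pvIsStart x) ++ rest.dropWhile (fun x => !pvIsStart x) :=
        (List.takeWhile_append_dropWhile).symm
      set t := rest.takeWhile (fun x => !pvIsStart x) with hT
      have htno : ∀ x ∈ t, pvIsStart x = false := by
        intro x hx
        have := List.mem_takeWhile_imp hx
        simpa using this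
      cases hr : rest.dropWhile (fun x => !pvIsStart x) with
      | nil =>
          have htr : t = rest := by rw [hsplit, hr, List.append_nil]
          have hstarts : pvStarts rest = [] := by
            rw [← htr]
            have h2 := pvStarts_no_start_append t [] htno
            simpa [pvStarts] using h2
          rw [pvChunks_cons, hstarts, hr, pvChunks_nil]
          simp only [List.map_nil, List.nil_append, pvSlices]
          rw [List.drop_left' (l₁ := u) rfl]
          have h1 : u.length + 1 + rest.length - u.length = rest.length + 1 := by omega
          rw [h1, ← hT, htr, List.take_succ_cons, List.take_length]
      | cons s rest'' =>
          have hs : pvIsStart s = true := by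
            have hne : rest.dropWhile (fun x => !pvIsStart x) ≠ [] := by rw [hr]; simp
            have h2 := List.head_dropWhile_not (fun x => !pvIsStart x) hne
            simp only [hr, List.head_cons] at h2
            simpa using h2
          have hrest : rest = t ++ s :: rest'' := by rw [hsplit, hr]
          have hlenrest : rest.length = t.length + 1 + rest''.length := by
            rw [hrest]; simp; omega
          have hstarts : pvStarts rest = t.length :: (pvStarts rest'').map (· + (t.length + 1)) := by
            rw [hrest, pvStarts_no_start_append t (s :: rest'') htno, pvStarts]
            simp only [hs, if_true, List.map_cons, List.map_map]
            congr 1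
            · simp
            · apply List.map_congr_left
              intro k _; simp; omega
          have hlen'' : rest''.length ≤ n := by omega
          rw [pvChunks_cons, hstarts, hr, ← hT]
          simp only [List.map_cons, List.cons_append, pvSlices]
          congr 1
          · -- first slice is r :: t
            have harith : t.length + (u.length + 1) - u.length = t.length + 1 := by omega
            rw [harith, List.drop_left' (l₁ := u) rfl, hrest, List.take_succ_cons]
            congr 1
            exact List.take_left' rfl
          · -- remaining slices
            have hu' : (u ++ r :: t).length = t.length + (u.length + 1) := by simp; omega
            have heq : u ++ r :: rest = (u ++ r :: t) ++ s :: rest'' := by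
              rw [hrest]; simp
            have hlast : u.length + 1 + rest.length = (u ++ r :: t).length + 1 + rest''.length := by
              rw [hu']; omega
            have hmm : ((pvStarts rest'').map (· + (t.length + 1))).map (· + (u.length + 1)) =
                (pvStarts rest'').map (· + ((u ++ r :: t).length + 1)) := by
              rw [List.map_map]
              apply List.map_congr_left
              intro k _; simp [hu']; omega
            rw [heq, hlast, hmm, ← hu']
            exact ih rest'' hlen'' (u ++ r :: t) s

theorem pvSlices_chunks0 (rest : List (List (String × String))) (r : List (String × String)) :
    pvSlices (r :: rest) (0 :: ((pvStarts rest).map (· + 1) ++ [1 + rest.length])) =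
      pvChunks (r :: rest) := by
  have h := pvSlices_chunks rest.length rest (le_refl _) [] r
  simpa using h

theorem pvB_eq_chunks (records : List (List (String × String))) :
    split_into_sessions_py_alt records = pvChunks records := by
  cases records with
  | nil => simp [split_into_sessions_py_alt, pvChunks_nil]
  | cons r rest =>
      have hb : (PySem.List.enumerate (r :: rest) 0).filterMap
            (fun p => if p.1 > 0 && pvIsStart p.2 then some p.1 else none) =
          (pvStarts rest).map (fun k => ((k + 1 : Nat) : Int)) := by
        rw [PySem.List.enumerate_cons, List.filterMap_cons]
        have h1 : ((0 : Int) + 1) = ((1 : Nat) : Int) := by norm_num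
        rw [h1, pvBounds_eq rest 1 (le_refl 1)]
        simp
      have hA : split_into_sessions_py_alt (r :: rest) =
          ((((0 : Int) :: ((PySem.List.enumerate (r :: rest) 0).filterMap
              (fun p => if p.1 > 0 && pvIsStart p.2 then some p.1 else none) ++
              [((r :: rest).length : Int)])).zip
            (((0 : Int) :: ((PySem.List.enumerate (r :: rest) 0).filterMap
              (fun p => if p.1 > 0 && pvIsStart p.2 then some p.1 else none) ++
              [((r :: rest).length : Int)])).tail)).map
            (fun p => PySem.List.slice (r :: rest) (some p.1) (some p.2))) := rfl
      have hedges : ((0 : Int) :: ((pvStarts rest).map (fun k => ((k + 1 : Nat) : Int)) ++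
            [((r :: rest).length : Int)])) =
          ((0 :: ((pvStarts rest).map (· + 1) ++ [1 + rest.length])) : List Nat).map
            (Nat.cast : Nat → Int) := by
        simp [List.map_map, Function.comp]
        omega
      rw [hA, hb, hedges, pvZipMap_eq_slices, pvSlices_chunks0]

-- ===== VERDICT (by name: the statement is the Claim_ definition above) =====
theorem split_into_sessions_py_spec : Claim_equal_split_into_sessions_py := by
  intro records _
  unfold Spec_split_into_sessions_py
  rw [pvA_eq_chunks, pvB_eq_chunks]
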